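-- pv_equiv track=rewrite | github.com/tsilva/parselabs | labs_parser/extraction.py | _build_standardized_names_section
-- ===== SOURCE A (Python) =====
-- def _build_standardized_names_section(standardized_names: list[str], lab_specs_data: dict) -> str:
--     """Build the standardized names reference section for the extraction prompt.
--
--     Args:
--         standardized_names: Sorted list of all standardized lab names
--         lab_specs_data: Raw lab specs dict for looking up primary units and lab types
--
--     Returns:
--         Formatted string to append to the system prompt
--     """
--
--     sections: dict[str, list[str]] = {
--         "blood": [],
--         "urine": [],
--         "feces": [],
--         "saliva": [],
--         "other": [],
--     }
--
--     # Build entries grouped by lab type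
--     for name in standardized_names:
--         spec = lab_specs_data.get(name, {})
--         primary_unit = spec.get("primary_unit", "")
--         lab_type = spec.get("lab_type", "blood")
--         entry = f"- {name} [{primary_unit}]"
--         sections.setdefault(lab_type, []).append(entry)
--
--     # Format each non-empty lab type section
--     result = "\n\nSTANDARDIZED LAB NAMES AND UNITS:\n"
--     for lab_type in ["blood", "urine", "feces", "saliva", "other"]:
--         entries = sections.get(lab_type, [])
--         if entries:
--             result += f"\n### {lab_type.title()}\n" + "\n".join(entries) + "\n"
--
--     return result
-- ===== SOURCE B (Python) =====
-- def _build_standardized_names_section(standardized_names: list[str], lab_specs_data: dict) -> str: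
--     """Per-type rescan: no buckets dict; filter the name list once per fixed lab type."""
--     result = "\n\nSTANDARDIZED LAB NAMES AND UNITS:\n"
--     for lab_type in ["blood", "urine", "feces", "saliva", "other"]:
--         entries = [
--             "- {} [{}]".format(name, lab_specs_data.get(name, {}).get("primary_unit", ""))
--             for name in standardized_names
--             if lab_specs_data.get(name, {}).get("lab_type", "blood") == lab_type
--         ]
--         if entries:
--             result += "\n### " + lab_type.title() + "\n" + "\n".join(entries) + "\n"
--     return result
-- ===== Notes on version B (the rewrite author's own statement) =====
-- stated objective: simpler
-- what changed: B drops A's pre-seeded buckets dict and its grouping pass; it instead rescans the name list once per fixed lab type with a filter/format comprehension and appends each non-empty section directly.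
import Mathlib
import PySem

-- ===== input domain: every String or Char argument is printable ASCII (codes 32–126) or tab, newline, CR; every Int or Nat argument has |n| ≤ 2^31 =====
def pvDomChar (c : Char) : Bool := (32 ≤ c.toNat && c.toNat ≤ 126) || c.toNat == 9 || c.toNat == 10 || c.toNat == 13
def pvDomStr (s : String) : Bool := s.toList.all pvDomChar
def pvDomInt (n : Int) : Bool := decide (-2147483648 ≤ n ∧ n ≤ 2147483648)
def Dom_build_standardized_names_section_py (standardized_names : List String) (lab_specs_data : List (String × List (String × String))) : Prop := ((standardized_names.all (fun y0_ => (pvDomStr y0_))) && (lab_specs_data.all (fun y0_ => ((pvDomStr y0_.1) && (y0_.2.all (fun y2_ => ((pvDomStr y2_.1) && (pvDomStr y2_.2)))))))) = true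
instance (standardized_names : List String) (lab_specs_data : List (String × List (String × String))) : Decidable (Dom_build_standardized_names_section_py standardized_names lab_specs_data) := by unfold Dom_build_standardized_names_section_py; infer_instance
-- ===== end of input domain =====

-- B replaces A's pre-seeded buckets dict and single grouping pass by one filtering scan of the
-- name list per fixed lab type (simpler decomposition; same output, order and whitespace).

-- shared helper: Python str.title(), exact on ASCII letters (both Pythons call .title())
def pvTitleChars : Bool → List Char → List Char
  | _, [] => []
  | prevAlpha, c :: rest =>
    let isA := c.isAlpha
    (if isA then (if prevAlpha then c.toLower else c.toUpper) else c) :: pvTitleChars isA rest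

def pvTitle (s : String) : String := String.ofList (pvTitleChars false s.toList)

-- ===== PORT A =====
def build_standardized_names_section_py (standardized_names : List String) (lab_specs_data : List (String × List (String × String))) : String :=
  let sections : PySem.Dict String (List String) :=
    PySem.Dict.mk [("blood", []), ("urine", []), ("feces", []), ("saliva", []), ("other", [])]
  let sections := standardized_names.foldl (fun d name =>
      let spec := (PySem.Dict.mk lab_specs_data).getD name []
      let primary_unit := (PySem.Dict.mk spec).getD "primary_unit" ""
      let lab_type := (PySem.Dict.mk spec).getD "lab_type" "blood"
      let entry := "- " ++ name ++ " [" ++ primary_unit ++ "]"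
      d.modify lab_type [] (fun x => x ++ [entry])) sections
  let result := "\n\nSTANDARDIZED LAB NAMES AND UNITS:\n"
  ["blood", "urine", "feces", "saliva", "other"].foldl (fun result lab_type =>
      let entries := sections.getD lab_type []
      if entries = [] then result
      else result ++ "\n### " ++ pvTitle lab_type ++ "\n" ++ PySem.Str.join "\n" entries ++ "\n")
    result

-- ===== PORT B =====
def build_standardized_names_section_py_alt (standardized_names : List String) (lab_specs_data : List (String × List (String × String))) : String :=
  ["blood", "urine", "feces", "saliva", "other"].foldl (fun result lab_type =>
      let entries := (standardized_names.filter (fun name =>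
          (PySem.Dict.mk ((PySem.Dict.mk lab_specs_data).getD name [])).getD "lab_type" "blood" == lab_type)).map
        (fun name =>
          "- " ++ name ++ " [" ++ (PySem.Dict.mk ((PySem.Dict.mk lab_specs_data).getD name [])).getD "primary_unit" "" ++ "]")
      if entries = [] then result
      else result ++ "\n### " ++ pvTitle lab_type ++ "\n" ++ PySem.Str.join "\n" entries ++ "\n")
    "\n\nSTANDARDIZED LAB NAMES AND UNITS:\n"

-- ===== PRECONDITION & SPEC =====
def Spec_build_standardized_names_section_py (standardized_names : List String) (lab_specs_data : List (String × List (String × String))) (out : String) : Prop := out = build_standardized_names_section_py_alt standardized_names lab_specs_data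
instance (standardized_names : List String) (lab_specs_data : List (String × List (String × String))) (out : String) : Decidable (Spec_build_standardized_names_section_py standardized_names lab_specs_data out) := by unfold Spec_build_standardized_names_section_py; infer_instance

-- ===== CLAIM (what is proved, stated in full; the proofs are below) =====
def Claim_equal_build_standardized_names_section_py : Prop := ∀ (standardized_names : List String) (lab_specs_data : List (String × List (String × String))), Dom_build_standardized_names_section_py standardized_names lab_specs_data → Spec_build_standardized_names_section_py standardized_names lab_specs_data (build_standardized_names_section_py standardized_names lab_specs_data)

-- ===== LEMMAS AND PROOFS =====

-- A's grouping loop, bucket by bucket: the bucket for a type t whose initial bucket is []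
-- equals B's per-type filtered scan (tf = the name's lab type, ef = its formatted entry)
lemma bucket_eq (names : List String) (tf ef : String → String)
    (d : PySem.Dict String (List String)) (t : String) (h : d.getD t [] = []) :
    (names.foldl (fun d name => d.modify (tf name) [] (fun x => x ++ [ef name])) d).getD t []
      = (names.filter (fun n => tf n == t)).map ef := by
  have := PySem.Dict.getD_foldl_modify_append (names.map (fun n => (tf n, ef n))) d t
  rw [List.foldl_map] at this
  simp only [this, h, List.nil_append, List.filter_map]
  rw [List.map_map]
  rfl

theorem build_standardized_names_section_py_spec_aux
    (names : List String) (data : List (String × List (String × String))) :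
    build_standardized_names_section_py names data
      = build_standardized_names_section_py_alt names data := by
  unfold build_standardized_names_section_py build_standardized_names_section_py_alt
  simp only [List.foldl_cons, List.foldl_nil]
  rw [bucket_eq names
        (fun name => (PySem.Dict.mk ((PySem.Dict.mk data).getD name [])).getD "lab_type" "blood")
        (fun name => "- " ++ name ++ " [" ++ (PySem.Dict.mk ((PySem.Dict.mk data).getD name [])).getD "primary_unit" "" ++ "]")
        _ "blood" (by decide),
      bucket_eq names _ _ _ "urine" (by decide),
      bucket_eq names _ _ _ "feces" (by decide),
      bucket_eq names _ _ _ "saliva" (by decide),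
      bucket_eq names _ _ _ "other" (by decide)]

-- ===== VERDICT (by name: the statement is the Claim_ definition above) =====
theorem build_standardized_names_section_py_spec : Claim_equal_build_standardized_names_section_py := by
  intro names data _
  exact build_standardized_names_section_py_spec_aux names data
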